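-- pv_equiv track=rewrite | github.com/FakeYou/advent-of-code | day-15/solve.py | part2
-- ===== SOURCE A (Python) =====
-- import operator
-- from functools import reduce
--
-- def prod(factors):
--     return reduce(operator.mul, factors, 1)
--
-- def calculateScore(ingredients, ratio):
--     rotate = [list(l) for l in list(zip(*ingredients))]
--
--     # black magic
--     return prod([max(0, sum(map(lambda pair: prod(pair), zip(rot, ratio)))) for rot in rotate])
--
-- def part2(ingredients):
--     maxScore = 0
--
--     # save the calories in a seperate array
--     calories = [ingredient[-1:] for ingredient in ingredients]
--     ingredients = [ingredient[:-1] for ingredient in ingredients]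
--
--     for i in range(0, 100):
--         for j in range(0, 100 - i):
--             for k in range(0, 100 - i - j):
--                 h = 100 - i - j - k
--
--                 # only cookies with 500 calories are allowed
--                 if calculateScore(calories, [i, j, k, h]) != 500:
--                     continue
--
--                 # save the highest score
--                 maxScore = max(maxScore, calculateScore(ingredients, [i, j, k, h]))
--
--     return maxScore
-- ===== SOURCE B (Python) =====
-- def _dot(col, ratio):
--     return sum(c * r for c, r in zip(col, ratio))
--
-- def _score(cols, ratio):
--     total = 1
--     for col in cols:
--         total *= max(0, _dot(col, ratio))
--     return total
--
-- def part2(ingredients):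
--     # the single calorie column (empty when an ingredient carries no data)
--     cal_cols = list(zip(*(ing[-1:] for ing in ingredients)))
--     cal = cal_cols[0] if cal_cols else ()
--     # transposed property columns, computed once
--     cols = list(zip(*(ing[:-1] for ing in ingredients)))
--     slope = _dot(cal, [0, 0, 1, -1])
--     best = 0
--     for i in range(100):
--         for j in range(100 - i):
--             h0 = 100 - i - j
--             # calories as a function of k is affine: base + slope * k = 500
--             rhs = 500 - _dot(cal, [i, j, 0, h0])
--             if slope != 0:
--                 if rhs % slope == 0:
--                     k = rhs // slope
--                     if 0 <= k < h0:
--                         best = max(best, _score(cols, [i, j, k, h0 - k]))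
--             elif rhs == 0:
--                 for k in range(h0):
--                     best = max(best, _score(cols, [i, j, k, h0 - k]))
--     return best
-- ===== Notes on version B (the rewrite author's own statement) =====
-- stated objective: faster
-- what changed: B drops A's innermost 100-iteration loop: the calorie total is affine in k, so B solves base + slope*k = 500 per (i,j) (scanning k only in the degenerate slope = 0 case) and transposes the ingredient matrix into its calorie column and property columns once, instead of re-transposing and re-scoring inside every iteration.
import Mathlib
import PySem

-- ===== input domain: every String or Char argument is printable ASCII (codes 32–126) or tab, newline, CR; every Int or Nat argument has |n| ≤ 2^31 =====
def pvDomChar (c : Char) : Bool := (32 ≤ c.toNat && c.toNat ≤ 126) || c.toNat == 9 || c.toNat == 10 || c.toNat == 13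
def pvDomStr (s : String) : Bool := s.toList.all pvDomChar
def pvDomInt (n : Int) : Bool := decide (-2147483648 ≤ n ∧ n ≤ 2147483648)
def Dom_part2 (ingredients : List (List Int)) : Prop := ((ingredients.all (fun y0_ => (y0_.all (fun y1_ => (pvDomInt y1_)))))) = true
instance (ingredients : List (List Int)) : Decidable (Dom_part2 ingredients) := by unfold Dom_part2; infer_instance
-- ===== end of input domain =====

-- B replaces the innermost k-loop by solving the calorie constraint linearly for k per (i, j)
-- and precomputes the transposed property columns once (faster; return-value equivalence).

-- ===== PORT A =====
-- prod(factors) = reduce(operator.mul, factors, 1)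
def pyProd (factors : List Int) : Int := factors.foldl (· * ·) 1

-- zip(*ingredients) followed by [list(l) for l in …]: transpose truncated to the shortest row
def pyZipStar : List (List Int) → List (List Int)
  | [] => []
  | r :: rs =>
    if h : (r :: rs).all (fun x => !x.isEmpty) then
      ((r :: rs).map (fun x => x.headI)) :: pyZipStar ((r :: rs).map (fun x => x.tail))
    else []
termination_by rows => rows.headI.length
decreasing_by
  simp only [List.all_cons, Bool.and_eq_true, Bool.not_eq_true', List.isEmpty_eq_false_iff] at h
  simp only [List.map_cons, List.headI]
  cases r with
  | nil => exact absurd rfl h.1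
  | cons a t => simp [List.tail]

def calculateScore (ingredients : List (List Int)) (ratio : List Int) : Int :=
  let rotate := pyZipStar ingredients
  -- prod(pair) over a 2-tuple pair is pair.1 * pair.2
  pyProd (rotate.map (fun rot => max 0 (((rot.zip ratio).map (fun p => p.1 * p.2)).sum)))

def part2 (ingredients : List (List Int)) : Int :=
  let calories := ingredients.map (fun ingredient => PySem.List.slice ingredient (some (-1)) none)
  let ingredients2 := ingredients.map (fun ingredient => PySem.List.slice ingredient none (some (-1)))
  (PySem.List.pyRange 0 100 1).foldl (fun maxScore i =>
    (PySem.List.pyRange 0 (100 - i) 1).foldl (fun maxScore j =>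
      (PySem.List.pyRange 0 (100 - i - j) 1).foldl (fun maxScore k =>
        let h := 100 - i - j - k
        if calculateScore calories [i, j, k, h] ≠ 500 then maxScore
        else max maxScore (calculateScore ingredients2 [i, j, k, h])) maxScore) maxScore) 0

-- ===== PORT B =====
-- sum(c * r for c, r in zip(col, ratio))
def dotB (col ratio : List Int) : Int := ((col.zip ratio).map (fun p => p.1 * p.2)).sum

def scoreB (cols : List (List Int)) (ratio : List Int) : Int :=
  cols.foldl (fun total col => total * max 0 (dotB col ratio)) 1

def part2_alt (ingredients : List (List Int)) : Int :=
  -- list(zip(*(ing[-1:] for ing in ingredients)))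
  let calCols := pyZipStar (ingredients.map (fun ing => PySem.List.slice ing (some (-1)) none))
  -- cal_cols[0] if cal_cols else ()
  let calories := calCols.headD []
  -- list(zip(*(ing[:-1] for ing in ingredients)))
  let cols := pyZipStar (ingredients.map (fun ing => PySem.List.slice ing none (some (-1))))
  let slope := dotB calories [0, 0, 1, -1]
  (PySem.List.pyRange 0 100 1).foldl (fun best i =>
    (PySem.List.pyRange 0 (100 - i) 1).foldl (fun best j =>
      let h0 := 100 - i - j
      -- calories as a function of k is affine: base + slope * k = 500
      let rhs := 500 - dotB calories [i, j, 0, h0]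
      if slope ≠ 0 then
        if PySem.Int.mod rhs slope = 0 then
          let k := PySem.Int.floordiv rhs slope
          if 0 ≤ k ∧ k < h0 then
            max best (scoreB cols [i, j, k, h0 - k])
          else best
        else best
      else if rhs = 0 then
        (PySem.List.pyRange 0 h0 1).foldl (fun best k =>
          max best (scoreB cols [i, j, k, h0 - k])) best
      else best) best) 0

-- ===== PRECONDITION & SPEC =====
def Spec_part2 (ingredients : List (List Int)) (out : Int) : Prop := out = part2_alt ingredients
instance (ingredients : List (List Int)) (out : Int) : Decidable (Spec_part2 ingredients out) := by unfold Spec_part2; infer_instance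

-- ===== CLAIM (what is proved, stated in full; the proofs are below) =====
def Claim_equal_part2 : Prop := ∀ (ingredients : List (List Int)), Dom_part2 ingredients → Spec_part2 ingredients (part2 ingredients)

-- ===== LEMMAS AND PROOFS =====

-- minimum row length of r :: rs (the length to which zip(*rows) truncates)
def minLen (r : List Int) (rs : List (List Int)) : Nat := rs.foldl (fun a s => min a s.length) r.length

def mlenT : List (List Int) → Nat
  | [] => 0
  | r :: rs => minLen r rs

lemma foldl_min_pred : ∀ (rs : List (List Int)) (x : Nat),
    rs.foldl (fun a s => min a (s.length - 1)) (x - 1) = (rs.foldl (fun a s => min a s.length) x) - 1 := by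
  intro rs
  induction rs with
  | nil => intro x; rfl
  | cons s t ih =>
    intro x
    simp only [List.foldl_cons]
    have h : min (x - 1) (s.length - 1) = min x s.length - 1 := by omega
    rw [h, ih]

lemma foldl_min_le_all : ∀ (rs : List (List Int)) (a : Nat),
    rs.foldl (fun x s => min x s.length) a ≤ a ∧ ∀ s ∈ rs, rs.foldl (fun x s => min x s.length) a ≤ s.length := by
  intro rs
  induction rs with
  | nil => intro a; simp
  | cons s t ih =>
    intro a
    simp only [List.foldl_cons, List.mem_cons]
    refine ⟨le_trans (ih _).1 (by omega), ?_⟩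
    rintro u (rfl | hu)
    · exact le_trans (ih _).1 (by omega)
    · exact (ih _).2 u hu

lemma minLen_pos (r : List Int) (rs : List (List Int)) (h : ∀ s ∈ r :: rs, s ≠ []) :
    1 ≤ minLen r rs := by
  unfold minLen
  have haux : ∀ (t : List (List Int)) (a : Nat), 1 ≤ a → (∀ s ∈ t, s ≠ []) →
      1 ≤ t.foldl (fun x s => min x s.length) a := by
    intro t
    induction t with
    | nil => intro a ha _; simpa using ha
    | cons u v ih =>
      intro a ha hall
      simp only [List.foldl_cons]
      have hu : u ≠ [] := hall u (by simp)
      have : 1 ≤ u.length := by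
        cases u with
        | nil => exact absurd rfl hu
        | cons _ _ => simp
      exact ih _ (by omega) (fun s hs => hall s (by simp [hs]))
  have hr : r ≠ [] := h r (by simp)
  have hr1 : 1 ≤ r.length := by
    cases r with
    | nil => exact absurd rfl hr
    | cons _ _ => simp
  exact haux _ _ hr1 (fun s hs => h s (by simp [hs]))

lemma minLen_zero_of_empty (r : List Int) (rs : List (List Int)) (s : List Int)
    (hs : s ∈ r :: rs) (hse : s = []) : minLen r rs = 0 := by
  subst hse
  rcases List.mem_cons.mp hs with h1 | hmem
  · have h2 := (foldl_min_le_all rs (List.length ([] : List Int))).1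
    unfold minLen
    rw [← h1]
    simp only [List.length_nil] at h2 ⊢
    omega
  · have := (foldl_min_le_all rs r.length).2 _ hmem
    unfold minLen
    simp at this
    omega

lemma minLen_map_tail (r : List Int) (rs : List (List Int)) :
    minLen r.tail (rs.map (fun s => s.tail)) = minLen r rs - 1 := by
  unfold minLen
  rw [List.foldl_map]
  have h1 : r.tail.length = r.length - 1 := by simp
  have h2 : (fun (a : Nat) (s : List Int) => min a s.tail.length)
      = (fun (a : Nat) (s : List Int) => min a (s.length - 1)) := by
    funext a s; simp
  rw [h1, h2, foldl_min_pred]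

lemma headI_eq_getD (s : List Int) : s.headI = s.getD 0 0 := by
  cases s <;> simp

-- the transpose zip(*rows) as an indexed table
lemma pyZipStar_eq (rows : List (List Int)) :
    pyZipStar rows = (List.range (mlenT rows)).map (fun p => rows.map (fun s => s.getD p 0)) := by
  induction rows using pyZipStar.induct with
  | case1 => simp [pyZipStar, mlenT]
  | case2 r rs h ih =>
    have hall : ∀ s ∈ r :: rs, s ≠ [] := by
      intro s hs
      have := List.all_eq_true.mp h s hs
      simpa [List.isEmpty_iff] using this
    rw [pyZipStar, dif_pos h, ih]
    have hmt : mlenT ((r :: rs).map (fun x => x.tail)) = mlenT (r :: rs) - 1 := by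
      simp only [List.map_cons, mlenT]
      exact minLen_map_tail r rs
    have hpos : 1 ≤ mlenT (r :: rs) := minLen_pos r rs hall
    obtain ⟨m, hm⟩ : ∃ m, mlenT (r :: rs) = m + 1 := ⟨mlenT (r :: rs) - 1, by omega⟩
    rw [hmt, hm]
    simp only [Nat.add_sub_cancel, List.range_succ_eq_map, List.map_cons, List.map_map]
    congr 1
    · simp [headI_eq_getD]
    · apply List.map_congr_left
      intro p _
      simp [Function.comp]
  | case3 r rs h =>
    rw [pyZipStar, dif_neg h]
    obtain ⟨s, hs, hse⟩ : ∃ s ∈ r :: rs, s = [] := by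
      by_contra hc
      push Not at hc
      exact h (List.all_eq_true.mpr (fun s hs => by simpa [List.isEmpty_iff] using hc s hs))
    have : mlenT (r :: rs) = 0 := minLen_zero_of_empty r rs s hs hse
    simp [mlenT] at this ⊢
    simp [this]

lemma drop_len_sub_one : ∀ (r : List Int), r ≠ [] → r.drop (r.length - 1) = [r.getLastD 0]
  | [a], _ => rfl
  | a :: b :: t, _ => by
    have := drop_len_sub_one (b :: t) (by simp)
    simpa [List.getLastD] using this

-- for nonempty rows, zip(*[ing[-1:] …]) is the single column of last elements
lemma zipStar_last (rows : List (List Int)) (hne : rows ≠ []) (hall : ∀ s ∈ rows, s ≠ []) :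
    pyZipStar (rows.map (fun s => PySem.List.slice s (some (-1)) none))
      = [rows.map (fun s => s.getLastD 0)] := by
  have hmap : rows.map (fun s => PySem.List.slice s (some (-1)) none)
      = rows.map (fun s => [s.getLastD 0]) := by
    apply List.map_congr_left
    intro s hs
    rw [PySem.List.slice_from_neg_one]
    exact drop_len_sub_one s (hall s hs)
  rw [hmap, pyZipStar_eq]
  have hm : mlenT (rows.map (fun s => [s.getLastD 0])) = 1 := by
    cases rows with
    | nil => exact absurd rfl hne
    | cons r rs =>
      simp only [List.map_cons, mlenT]
      have hle := (foldl_min_le_all ((rs.map (fun s => [s.getLastD 0]))) ([r.getLastD 0].length)).1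
      have hge : 1 ≤ minLen [r.getLastD 0] (rs.map (fun s => [s.getLastD 0])) := by
        apply minLen_pos
        intro s hs
        rcases List.mem_cons.mp hs with rfl | hmem
        · simp
        · obtain ⟨u, _, rfl⟩ := List.mem_map.mp hmem
          simp
      unfold minLen at hge ⊢
      simp only [List.length_cons, List.length_nil] at hle hge ⊢
      omega
  rw [hm]
  simp only [List.range_one, List.map_cons, List.map_nil]
  congr 1
  rw [List.map_map]
  apply List.map_congr_left
  intro s _
  simp

-- degenerate matrix (no rows, or a row with no data): the transposes are empty
lemma zipStar_cal_nil (rows : List (List Int)) (h0 : rows = [] ∨ ∃ s ∈ rows, s = []) :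
    pyZipStar (rows.map (fun s => PySem.List.slice s (some (-1)) none)) = [] := by
  rw [pyZipStar_eq]
  have hz : mlenT (rows.map (fun s => PySem.List.slice s (some (-1)) none)) = 0 := by
    rcases h0 with rfl | ⟨s, hs, rfl⟩
    · simp [mlenT]
    · cases hrm : rows.map (fun s => PySem.List.slice s (some (-1)) none) with
      | nil => simp [mlenT]
      | cons r rs =>
        have hmem : ([] : List Int) ∈ rows.map (fun s => PySem.List.slice s (some (-1)) none) := by
          refine List.mem_map.mpr ⟨[], hs, ?_⟩
          rw [PySem.List.slice_from_neg_one]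
          rfl
        rw [hrm] at hmem
        simpa [mlenT] using minLen_zero_of_empty r rs [] hmem rfl
  rw [hz]
  rfl

-- calorie score of the nonempty rows: one column, the dot with the last elements
lemma calScore_dot (rows : List (List Int)) (hne : rows ≠ []) (hall : ∀ s ∈ rows, s ≠ [])
    (ratio : List Int) :
    calculateScore (rows.map (fun s => PySem.List.slice s (some (-1)) none)) ratio
      = max 0 (dotB (rows.map (fun s => s.getLastD 0)) ratio) := by
  unfold calculateScore
  rw [zipStar_last rows hne hall]
  simp only [List.map_cons, List.map_nil]
  unfold pyProd dotB
  simp only [List.foldl_cons, List.foldl_nil, one_mul]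

-- A's property score is B's fold over the same transposed columns
lemma calcEqScore (P : List (List Int)) (ratio : List Int) :
    calculateScore P ratio = scoreB (pyZipStar P) ratio := by
  unfold calculateScore scoreB pyProd
  rw [List.foldl_map]
  rfl

-- the calorie dot is affine in k (whatever the truncation length of the zip)
lemma dot_affine (cal : List Int) (i j k h0 : Int) :
    dotB cal [i, j, k, h0 - k] = dotB cal [i, j, 0, h0] + dotB cal [0, 0, 1, -1] * k := by
  rcases cal with _ | ⟨c0, _ | ⟨c1, _ | ⟨c2, _ | ⟨c3, t⟩⟩⟩⟩ <;> simp [dotB, List.zip] <;> ring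

lemma foldl_hit_nat (f : Int → Int) (k0 : Int) (n : Nat) (a : Int) :
    ((PySem.List.pyRange 0 (n : Int) 1).foldl
      (fun acc k => if k = k0 then max acc (f k) else acc) a)
      = if 0 ≤ k0 ∧ k0 < (n : Int) then max a (f k0) else a := by
  induction n with
  | zero =>
    rw [PySem.List.pyRange_one_eq_nil (by norm_num)]
    have hc : ¬ (0 ≤ k0 ∧ k0 < ((0 : Nat) : Int)) := by push_cast; omega
    rw [if_neg hc]
    rfl
  | succ n ih =>
    have hcast : ((n + 1 : Nat) : Int) = (n : Int) + 1 := by push_cast; ring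
    rw [hcast, PySem.List.pyRange_one_succ_right (by positivity), List.foldl_append, ih]
    simp only [List.foldl_cons, List.foldl_nil]
    by_cases hk : (n : Int) = k0
    · rw [if_pos hk, if_neg (by omega), if_pos (by omega), hk]
    · rw [if_neg hk]
      by_cases h1 : 0 ≤ k0 ∧ k0 < (n : Int)
      · rw [if_pos h1, if_pos (by omega)]
      · rw [if_neg h1, if_neg (by omega)]

lemma foldl_hit (f : Int → Int) (k0 N a : Int) :
    ((PySem.List.pyRange 0 N 1).foldl (fun acc k => if k = k0 then max acc (f k) else acc) a)
      = if 0 ≤ k0 ∧ k0 < N then max a (f k0) else a := by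
  by_cases hN : N ≤ 0
  · rw [PySem.List.pyRange_one_eq_nil hN]
    rw [if_neg (by omega)]
    rfl
  · have h : N = ((N.toNat : Nat) : Int) := by omega
    rw [h, foldl_hit_nat]

-- the inner k-loop of A collapses to B's linear solution per (i, j)
lemma inner_eq (base slope : Int) (s : Int → Int) (N a : Int) :
    ((PySem.List.pyRange 0 N 1).foldl
      (fun acc k => if max 0 (base + slope * k) ≠ 500 then acc else max acc (s k)) a)
      = (if slope ≠ 0 then
           if PySem.Int.mod (500 - base) slope = 0 then
             if 0 ≤ PySem.Int.floordiv (500 - base) slope ∧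
                PySem.Int.floordiv (500 - base) slope < N then
               max a (s (PySem.Int.floordiv (500 - base) slope))
             else a
           else a
         else if 500 - base = 0 then
           (PySem.List.pyRange 0 N 1).foldl (fun acc k => max acc (s k)) a
         else a) := by
  have hmax : ∀ k : Int, (max 0 (base + slope * k) ≠ 500)
      ↔ ¬ (slope * k = 500 - base) := by
    intro k
    constructor
    · intro hne hE
      apply hne
      have : base + slope * k = 500 := by omega
      rw [this]
      norm_num
    · intro hne hE
      apply hne
      omega
  by_cases hd : slope = 0
  · rw [if_neg (by simpa using hd)]
    by_cases hr : 500 - base = 0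
    · rw [if_pos hr]
      apply PySem.List.foldl_congr_mem
      intro acc k _
      rw [if_neg]
      rw [hmax k, hd, hr]
      simp
    · rw [if_neg hr]
      rw [PySem.List.foldl_congr_mem _ _ (fun acc _ => acc) a ?_]
      · exact List.foldl_fixed _
      · intro acc k _
        rw [if_pos]
        rw [hmax k, hd]
        intro hE
        simp only [zero_mul] at hE
        exact hr hE.symm
  · rw [if_pos hd]
    by_cases hm : PySem.Int.mod (500 - base) slope = 0
    · rw [if_pos hm]
      have hk0 : slope * PySem.Int.floordiv (500 - base) slope = 500 - base := by
        have hfm := PySem.Int.floordiv_mul_add_mod (500 - base) slope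
        rw [hm, add_zero] at hfm
        linarith [hfm]
      have huni : ∀ k : Int, (slope * k = 500 - base)
          ↔ k = PySem.Int.floordiv (500 - base) slope := by
        intro k
        constructor
        · intro hE
          exact mul_left_cancel₀ hd (hE.trans hk0.symm)
        · rintro rfl
          exact hk0
      rw [PySem.List.foldl_congr_mem _ _
        (fun acc k => if k = PySem.Int.floordiv (500 - base) slope
          then max acc (s k) else acc) a ?_]
      · rw [foldl_hit]
      · intro acc k _
        beta_reduce
        by_cases hkk : k = PySem.Int.floordiv (500 - base) slope
        · rw [if_pos hkk, if_neg]
          rw [hmax k]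
          simp only [not_not, hkk]
          exact hk0
        · rw [if_neg hkk, if_pos]
          rw [hmax k]
          simp [huni k, hkk]
    · rw [if_neg hm]
      have hndvd : ∀ k : Int, ¬ (slope * k = 500 - base) := by
        intro k hE
        exact hm ((PySem.Int.mod_eq_zero_iff_dvd _ _).mpr (Dvd.intro k (by linarith [hE])))
      rw [PySem.List.foldl_congr_mem _ _ (fun acc _ => acc) a ?_]
      · exact List.foldl_fixed _
      · intro acc k _
        rw [if_pos]
        rw [hmax k]
        exact hndvd k

-- ===== VERDICT (by name: the statement is the Claim_ definition above) =====
theorem part2_spec : Claim_equal_part2 := by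
  intro rows _
  unfold Spec_part2
  by_cases h0 : rows = [] ∨ ∃ s ∈ rows, s = []
  · -- degenerate matrix: every calorie score is the empty product 1 ≠ 500; both sides give 0
    have hcal := zipStar_cal_nil rows h0
    simp only [part2, part2_alt, hcal]
    apply PySem.List.foldl_congr_mem
    intro acc i _
    apply PySem.List.foldl_congr_mem
    intro acc2 j _
    beta_reduce
    rw [PySem.List.foldl_congr_mem _ _ (fun a _ => a) acc2 ?_]
    · rw [List.foldl_fixed]
      simp [dotB]
    · intro acc3 k _
      have h1 : calculateScore (rows.map (fun s => PySem.List.slice s (some (-1)) none))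
          [i, j, k, 100 - i - j - k] = 1 := by
        unfold calculateScore
        rw [hcal]
        rfl
      simp [h1]
  · push Not at h0
    obtain ⟨hne, hall'⟩ := h0
    have hall : ∀ s ∈ rows, s ≠ [] := fun s hs => hall' s hs
    simp only [part2, part2_alt, zipStar_last rows hne hall, List.headD_cons]
    apply PySem.List.foldl_congr_mem
    intro acc i _
    apply PySem.List.foldl_congr_mem
    intro acc2 j _
    beta_reduce
    rw [PySem.List.foldl_congr_mem _ _
      (fun acc3 k => if max 0 (dotB (rows.map (fun s => s.getLastD 0)) [i, j, 0, 100 - i - j]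
          + dotB (rows.map (fun s => s.getLastD 0)) [0, 0, 1, -1] * k) ≠ 500
        then acc3
        else max acc3 (scoreB (pyZipStar (rows.map (fun s => PySem.List.slice s none (some (-1)))))
          [i, j, k, 100 - i - j - k])) acc2 ?_]
    · exact inner_eq _ _ _ _ acc2
    · intro acc3 k _
      beta_reduce
      rw [calScore_dot rows hne hall [i, j, k, 100 - i - j - k], calcEqScore, dot_affine]
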